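-- pv_equiv track=rewrite | github.com/davidsonromero/MyPythonProjects | VigenereCypher.py | getRotationNumbers
-- ===== SOURCE A (Python) =====
-- alphabetWithAccents = ['a', 'á', 'à', 'ã', 'â', 'ä', 'b', 'c', 'ç', 'd', 'e', 'é', 'è', 'ê', 'ë', 'f', 'g', 'h', 'i', 'í', 'ì', 'î', 'ï', 'j', 'k', 'l', 'm', 'n', 'o', 'ó', 'ò', 'õ', 'ô', 'ö', 'p', 'q', 'r', 's', 't', 'u', 'ú', 'ù', 'û', 'ü', 'v', 'w', 'x', 'y', 'z', 'ç', 'ñ']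
--
-- def getRotationNumbers(password, text):
--     length = len(text)
--     password = password.lower()
--     rotationNumbers = []
--     for x in range(len(password)):
--         rotationNumbers.append(alphabetWithAccents.index(password[x]) + 1)
--     repeat = length // len(password)
--     for x in range(repeat):
--         for y in range(len(password)):
--             rotationNumbers.append(rotationNumbers[y])
--     return rotationNumbers
-- ===== SOURCE B (Python) =====
-- alphabetWithAccents = ['a', 'á', 'à', 'ã', 'â', 'ä', 'b', 'c', 'ç', 'd', 'e', 'é', 'è', 'ê', 'ë', 'f', 'g', 'h', 'i', 'í', 'ì', 'î', 'ï', 'j', 'k', 'l', 'm', 'n', 'o', 'ó', 'ò', 'õ', 'ô', 'ö', 'p', 'q', 'r', 's', 't', 'u', 'ú', 'ù', 'û', 'ü', 'v', 'w', 'x', 'y', 'z', 'ç', 'ñ']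
--
-- def getRotationNumbers(password, text):
--     password = password.lower()
--     n = len(password)
--     total = n * (1 + len(text) // n)
--     return [alphabetWithAccents.index(password[i % n]) + 1 for i in range(total)]
-- ===== Notes on version B (the rewrite author's own statement) =====
-- stated objective: simpler
-- what changed: Replaces the build-then-tile shape (base loop plus nested replication loops reading back earlier output entries) by one modular-index pass: total = n*(1+len(text)//n) values produced directly from password[i % n].
import Mathlib
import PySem

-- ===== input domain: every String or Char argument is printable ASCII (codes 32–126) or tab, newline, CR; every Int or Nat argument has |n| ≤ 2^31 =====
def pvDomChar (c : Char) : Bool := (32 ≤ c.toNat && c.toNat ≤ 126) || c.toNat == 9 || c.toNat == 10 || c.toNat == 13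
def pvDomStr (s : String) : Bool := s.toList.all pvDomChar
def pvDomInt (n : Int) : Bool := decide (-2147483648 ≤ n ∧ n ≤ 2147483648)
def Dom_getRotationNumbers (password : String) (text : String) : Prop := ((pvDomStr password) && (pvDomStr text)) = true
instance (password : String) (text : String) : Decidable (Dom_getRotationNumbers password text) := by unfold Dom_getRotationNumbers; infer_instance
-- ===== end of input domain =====

-- B replaces A's build-then-tile shape by a single modular-index pass over range(n*(1+len(text)//n)); same cost, simpler.

def pvAlph : List Char := ['a', 'á', 'à', 'ã', 'â', 'ä', 'b', 'c', 'ç', 'd', 'e', 'é', 'è', 'ê', 'ë', 'f', 'g', 'h', 'i', 'í', 'ì', 'î', 'ï', 'j', 'k', 'l', 'm', 'n', 'o', 'ó', 'ò', 'õ', 'ô', 'ö', 'p', 'q', 'r', 's', 't', 'u', 'ú', 'ù', 'û', 'ü', 'v', 'w', 'x', 'y', 'z', 'ç', 'ñ']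

-- ===== PORT A =====
-- literal transliteration: build the base list with .index lookups, then tile it by
-- re-reading entries rotationNumbers[y]; Pre_ guarantees indices are in range and
-- .index succeeds, so the `.getD` defaults are never used on admitted inputs.
def getRotationNumbers (password : String) (text : String) : List Int :=
  let length : Int := PySem.Str.len text
  let pw := (PySem.Str.lower password).toList
  let base := (List.range pw.length).foldl
    (fun acc x => acc ++ [((PySem.List.index? pvAlph (pw.getD x ' ')).getD 0 : Int) + 1]) []
  let rep := PySem.Int.floordiv length (pw.length : Int)
  (List.range rep.toNat).foldl
    (fun acc _ => (List.range pw.length).foldl (fun a y => a ++ [a.getD y 0]) acc) base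

-- ===== PORT B =====
def getRotationNumbers_alt (password : String) (text : String) : List Int :=
  let p := (PySem.Str.lower password).toList
  let n := p.length
  let total := n * (1 + (PySem.Int.floordiv (PySem.Str.len text) (n : Int)).toNat)
  (List.range total).map
    (fun i => ((PySem.List.index? pvAlph (p.getD (i % n) ' ')).getD 0 : Int) + 1)

-- ===== PRECONDITION & SPEC =====
-- Pre_ excludes exactly the inputs on which A raises: an empty password
-- (ZeroDivisionError at the '//') and a password containing a character whose
-- lowercase form is not in the alphabet (ValueError from .index).
def Pre_getRotationNumbers (password : String) (text : String) : Prop :=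
  PySem.Chars.lower password.toList ≠ [] ∧
  (PySem.Chars.lower password.toList).all (fun c => pvAlph.contains c) = true
instance (password : String) (text : String) : Decidable (Pre_getRotationNumbers password text) := by unfold Pre_getRotationNumbers; infer_instance

def pvWitness_getRotationNumbers : String × String := ("Abc", "hello world")

def Spec_getRotationNumbers (password : String) (text : String) (out : List Int) : Prop := out = getRotationNumbers_alt password text
instance (password : String) (text : String) (out : List Int) : Decidable (Spec_getRotationNumbers password text out) := by unfold Spec_getRotationNumbers; infer_instance

-- ===== CLAIM (what is proved, stated in full; the proofs are below) =====
def Claim_equal_getRotationNumbers : Prop := ∀ (password : String) (text : String), Dom_getRotationNumbers password text → Pre_getRotationNumbers password text → Spec_getRotationNumbers password text (getRotationNumbers password text)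

-- ===== LEMMAS AND PROOFS =====

-- fold that only appends mapped elements is a map
theorem pv_foldl_append_map (h : Nat → Int) :
    ∀ (l : List Nat) (acc : List Int),
      l.foldl (fun a x => a ++ [h x]) acc = acc ++ l.map h := by
  intro l
  induction l with
  | nil => simp
  | cons x xs ih => intro acc; simp [List.foldl_cons, ih]

-- reading each position of p through getD over range p.length is map
theorem pv_map_range_getD (g : Char → Int) (p : List Char) :
    (List.range p.length).map (fun x => g (p.getD x ' ')) = p.map g := by
  apply List.ext_getElem
  · simp
  · intro i h1 h2
    simp only [List.getElem_map, List.getElem_range]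
    rw [List.getD_eq_getElem p ' ' (by simpa using h2)]

-- A's inner tiling loop appends the first k entries of the accumulator
theorem pv_inner_fold (k : Nat) :
    ∀ (acc : List Int), k ≤ acc.length →
      (List.range k).foldl (fun a y => a ++ [a.getD y 0]) acc = acc ++ acc.take k := by
  induction k with
  | zero => intro acc _; simp
  | succ k ih =>
      intro acc hk
      rw [List.range_succ, List.foldl_append, ih acc (by omega)]
      simp only [List.foldl_cons, List.foldl_nil]
      have hklt : k < acc.length := by omega
      have hg : (acc ++ acc.take k).getD k 0 = acc[k] := by
        rw [List.getD_append _ _ _ _ hklt, List.getD_eq_getElem acc 0 hklt]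
      rw [hg, List.take_add_one, List.getElem?_eq_getElem hklt]
      simp

-- A's outer loop tiles the base r times
theorem pv_outer_fold (base : List Int) (n : Nat) (hb : n = base.length) (r : Nat) :
    (List.range r).foldl
      (fun acc _ => (List.range n).foldl (fun a y => a ++ [a.getD y 0]) acc) base
    = (List.replicate (r + 1) base).flatten := by
  subst hb
  induction r with
  | zero => simp
  | succ r ih =>
      rw [List.range_succ, List.foldl_append, ih]
      simp only [List.foldl_cons, List.foldl_nil]
      rw [pv_inner_fold base.length _ (by simp [List.length_flatten]; nlinarith [Nat.zero_le (r+1)])]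
      rw [show (List.replicate (r + 1) base).flatten = base ++ (List.replicate r base).flatten by
            simp [List.replicate_succ]]
      rw [List.take_left]
      rw [show List.replicate (r + 1 + 1) base = List.replicate (r + 1) base ++ [base] from
            List.replicate_succ' ..]
      simp [List.replicate_succ, List.append_assoc]

-- B's modular map over range (n*k) is k tiled copies of the base map
theorem pv_map_mod_range (h0 : Nat → Int) (n : Nat) (k : Nat) :
    (List.range (n * k)).map (fun i => h0 (i % n))
    = (List.replicate k ((List.range n).map h0)).flatten := by
  induction k with
  | zero => simp
  | succ k ih =>
      rw [Nat.mul_succ, List.range_add, List.map_append, ih, List.map_map]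
      have : (List.range n).map ((fun i => h0 (i % n)) ∘ (n * k + ·))
           = (List.range n).map h0 := by
        apply List.map_congr_left
        intro j hj
        have hjn : j < n := List.mem_range.mp hj
        simp [Function.comp, Nat.mod_eq_of_lt hjn]
      rw [this,
          show List.replicate (k + 1) ((List.range n).map h0)
             = List.replicate k ((List.range n).map h0) ++ [(List.range n).map h0] from
            List.replicate_succ' ..]
      simp

-- ===== VERDICT (by name: the statement is the Claim_ definition above) =====
theorem getRotationNumbers_spec : Claim_equal_getRotationNumbers := by
  intro password text _hdom hpre
  obtain ⟨_hne, _hmem⟩ := hpre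
  unfold Spec_getRotationNumbers getRotationNumbers getRotationNumbers_alt
  simp only []
  set p := (PySem.Str.lower password).toList with hp
  set g : Char → Int := fun c => ((PySem.List.index? pvAlph c).getD 0 : Int) + 1 with hgdef
  -- base list is p.map g
  rw [pv_foldl_append_map (fun x => g (p.getD x ' ')) (List.range p.length) []]
  simp only [List.nil_append]
  rw [pv_map_range_getD g p]
  -- the // on both sides is Nat division
  have hfd : (PySem.Int.floordiv (PySem.Str.len text) (p.length : Int)).toNat
      = text.toList.length / p.length := by
    rw [PySem.Str.len_eq, PySem.Int.floordiv_natCast]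
    exact Int.toNat_natCast _
  -- A side: tile (p.map g)
  rw [pv_outer_fold (p.map g) p.length (by simp) _]
  -- B side: modular map
  rw [pv_map_mod_range (fun x => g (p.getD x ' ')) p.length]
  rw [pv_map_range_getD g p, hfd]
  rw [Nat.add_comm 1 _]
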